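-- pv_equiv track=rewrite | github.com/SereneLian/ClinicalAge | run_ehr_age_inference.py | position_idx
-- ===== SOURCE A (Python) =====
-- def position_idx(tokens, symbol='SEP'):
--     pos = []
--     flag = 0
--     for token in tokens:
--         if token == symbol:
--             pos.append(flag)
--             flag += 1
--         else:
--             pos.append(flag)
--     return pos
-- ===== SOURCE B (Python) =====
-- def position_idx(tokens, symbol='SEP'):
--     if not tokens:
--         return []
--     ind = [1 if t == symbol else 0 for t in tokens]
--     sums = []
--     total = 0
--     for x in ind:
--         total += x
--         sums.append(total)
--     return [0] + sums[:-1]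
-- ===== Notes on version B (the rewrite author's own statement) =====
-- stated objective: alternative
-- what changed: Replaces the stateful append-then-maybe-increment loop with a table build (0/1 indicator per token) followed by an inclusive prefix-sum pass shifted right by one ([0] + sums[:-1]), i.e. an exclusive prefix sum.
import Mathlib
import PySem

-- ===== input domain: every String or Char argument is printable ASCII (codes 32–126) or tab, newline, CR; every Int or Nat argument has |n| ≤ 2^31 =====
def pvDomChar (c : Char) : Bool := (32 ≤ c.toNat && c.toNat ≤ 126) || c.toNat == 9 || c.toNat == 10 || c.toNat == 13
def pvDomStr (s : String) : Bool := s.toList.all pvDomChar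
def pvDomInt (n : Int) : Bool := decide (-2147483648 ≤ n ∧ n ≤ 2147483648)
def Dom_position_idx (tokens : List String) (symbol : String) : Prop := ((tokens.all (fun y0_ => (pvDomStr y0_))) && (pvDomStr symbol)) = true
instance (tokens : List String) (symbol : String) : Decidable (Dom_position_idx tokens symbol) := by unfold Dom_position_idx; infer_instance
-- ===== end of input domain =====

-- B rebuilds the result as an indicator table plus a shifted inclusive prefix sum instead of A's stateful counting loop; same cost, different decomposition.

-- ===== PORT A =====
-- pos/flag state threaded through the loop, branches in source order
def position_idx (tokens : List String) (symbol : String) : List Int :=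
  (tokens.foldl
    (fun (s : List Int × Int) token =>
      if token == symbol then (s.1 ++ [s.2], s.2 + 1)
      else (s.1 ++ [s.2], s.2))
    ([], 0)).1

-- ===== PORT B =====
def position_idx_alt (tokens : List String) (symbol : String) : List Int :=
  if tokens = [] then []
  else
    let ind := tokens.map (fun t => if t == symbol then (1 : Int) else 0)
    -- inclusive prefix sums of ind
    let sums := (ind.foldl (fun (s : List Int × Int) x => (s.1 ++ [s.2 + x], s.2 + x)) ([], 0)).1
    -- [0] + sums[:-1]
    0 :: PySem.List.slice sums none (some (-1))

-- ===== PRECONDITION & SPEC =====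
def Spec_position_idx (tokens : List String) (symbol : String) (out : List Int) : Prop := out = position_idx_alt tokens symbol
instance (tokens : List String) (symbol : String) (out : List Int) : Decidable (Spec_position_idx tokens symbol out) := by unfold Spec_position_idx; infer_instance

-- ===== CLAIM (what is proved, stated in full; the proofs are below) =====
def Claim_equal_position_idx : Prop := ∀ (tokens : List String) (symbol : String), Dom_position_idx tokens symbol → Spec_position_idx tokens symbol (position_idx tokens symbol)

-- ===== LEMMAS AND PROOFS =====

-- exclusive scan of an indicator list: the common reference shape
def pvExScan : List Int → Int → List Int
  | [], _ => []
  | x :: xs, f => f :: pvExScan xs (f + x)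

-- inclusive scan (B's sums loop, as a structural recursion)
def pvInScan : List Int → Int → List Int
  | [], _ => []
  | x :: xs, f => (f + x) :: pvInScan xs (f + x)

theorem pvA_foldl (symbol : String) :
    ∀ (tokens : List String) (acc : List Int) (flag : Int),
      (tokens.foldl
        (fun (s : List Int × Int) token =>
          if token == symbol then (s.1 ++ [s.2], s.2 + 1)
          else (s.1 ++ [s.2], s.2))
        (acc, flag)).1
      = acc ++ pvExScan (tokens.map (fun t => if t == symbol then (1 : Int) else 0)) flag := by
  intro tokens
  induction tokens with
  | nil => intro acc flag; simp [pvExScan]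
  | cons t ts ih =>
    intro acc flag
    by_cases h : (t == symbol) = true
    · simp only [List.foldl, h, if_pos]
      rw [ih]
      simp [pvExScan, eq_of_beq h]
    · simp only [List.foldl, h, Bool.false_eq_true, if_false]
      rw [ih]
      have h' : t ≠ symbol := by simpa using h
      simp [pvExScan, h']

theorem pvB_foldl :
    ∀ (ind : List Int) (acc : List Int) (tot : Int),
      (ind.foldl (fun (s : List Int × Int) x => (s.1 ++ [s.2 + x], s.2 + x)) (acc, tot)).1
      = acc ++ pvInScan ind tot := by
  intro ind
  induction ind with
  | nil => intro acc tot; simp [pvInScan]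
  | cons x xs ih => intro acc tot; simp [List.foldl, ih, pvInScan]

theorem pvEx_eq_cons_in :
    ∀ (xs : List Int) (f : Int), pvExScan xs f ++ [f + xs.sum] = f :: pvInScan xs f := by
  intro xs
  induction xs with
  | nil => intro f; simp [pvExScan, pvInScan]
  | cons x xs ih =>
    intro f
    simp only [pvExScan, pvInScan, List.cons_append, List.sum_cons]
    have := ih (f + x)
    rw [show f + (x + xs.sum) = f + x + xs.sum by ring, this]

theorem pvEx_eq_shift (xs : List Int) (hxs : xs ≠ []) (f : Int) :
    f :: (pvInScan xs f).dropLast = pvExScan xs f := by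
  have h := pvEx_eq_cons_in xs f
  have hlen : pvInScan xs f ≠ [] := by
    cases xs with
    | nil => exact absurd rfl hxs
    | cons x t => simp [pvInScan]
  have := congrArg List.dropLast h
  rw [List.dropLast_concat, List.dropLast_cons_of_ne_nil hlen] at this
  exact this.symm

-- ===== VERDICT (by name: the statement is the Claim_ definition above) =====
theorem position_idx_spec : Claim_equal_position_idx := by
  intro tokens symbol _
  unfold Spec_position_idx position_idx position_idx_alt
  by_cases h : tokens = []
  · subst h; simp
  · simp only [h, ite_false]
    rw [pvA_foldl, pvB_foldl, PySem.List.slice_to_neg_one]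
    simp only [List.nil_append]
    have hind : tokens.map (fun t => if t == symbol then (1 : Int) else 0) ≠ [] := by
      simpa using h
    rw [pvEx_eq_shift _ hind 0]
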